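-- pv_equiv track=rewrite | github.com/krupesh-10div/Cursor | generate_icart_json.py | choose_benefits
-- ===== SOURCE A (Python) =====
-- from typing import List, Tuple
--
-- BENEFITS = [
--     "Upselling & Cross-selling",
--     "Product Bundles & Volume Discounts",
--     "Progress Bars & Free Gifts",
--     "Sticky/Slide Cart Drawer & Cart Popups",
--     "In-cart Offers to Boost AOV",
-- ]
--
-- def choose_benefits(keyword: str) -> List[str]:
--     text = keyword.lower()
--     picks: List[str] = []
--
--     def add(item: str):
--         if item not in picks:
--             picks.append(item)
--
--     # Keyword-driven selection
--     if any(word in text for word in ["bundle", "bundling", "volume"]):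
--         add("Product Bundles & Volume Discounts")
--     if any(word in text for word in ["progress", "gift", "free gift", "goal"]):
--         add("Progress Bars & Free Gifts")
--     if any(word in text for word in ["drawer", "popup", "popups", "sticky", "slide cart"]):
--         add("Sticky/Slide Cart Drawer & Cart Popups")
--     if any(word in text for word in ["upsell", "cross", "cross-sell", "cross sell"]):
--         add("Upselling & Cross-selling")
--     if any(word in text for word in ["aov", "average order value", "increase aov", "boost sales"]):
--         add("In-cart Offers to Boost AOV")
--
--     # Ensure exactly 3 items to better meet the 25–30 word limit
--     for b in BENEFITS:
--         if len(picks) >= 3: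
--             break
--         if b not in picks:
--             add(b)
--
--     # Guarantee exactly 3 (never more than 4 allowed, but we keep 3 for brevity)
--     if len(picks) < 3:
--         for b in BENEFITS:
--             if b not in picks:
--                 add(b)
--             if len(picks) >= 3:
--                 break
--
--     if len(picks) > 3:
--         picks = picks[:3]
--
--     return picks
-- ===== SOURCE B (Python) =====
-- from typing import List
--
-- BENEFITS = [
--     "Upselling & Cross-selling",
--     "Product Bundles & Volume Discounts",
--     "Progress Bars & Free Gifts",
--     "Sticky/Slide Cart Drawer & Cart Popups",
--     "In-cart Offers to Boost AOV",
-- ]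
--
-- # keyword rules in A's check order, paired with the benefit each selects
-- KEYWORD_RULES = [
--     (["bundle", "bundling", "volume"], "Product Bundles & Volume Discounts"),
--     (["progress", "gift", "free gift", "goal"], "Progress Bars & Free Gifts"),
--     (["drawer", "popup", "popups", "sticky", "slide cart"], "Sticky/Slide Cart Drawer & Cart Popups"),
--     (["upsell", "cross", "cross-sell", "cross sell"], "Upselling & Cross-selling"),
--     (["aov", "average order value", "increase aov", "boost sales"], "In-cart Offers to Boost AOV"),
-- ]
--
-- def choose_benefits(keyword: str) -> List[str]:
--     text = keyword.lower()
--
--     def rank(benefit: str) -> int: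
--         # matched benefits rank by the position of their rule; the rest
--         # rank after all matches, by their position in BENEFITS
--         for i, (words, b) in enumerate(KEYWORD_RULES):
--             if b == benefit and any(w in text for w in words):
--                 return i
--         return len(KEYWORD_RULES) + BENEFITS.index(benefit)
--
--     return sorted(BENEFITS, key=rank)[:3]
-- ===== Notes on version B (the rewrite author's own statement) =====
-- stated objective: alternative
-- what changed: Replaces A's mutate-a-picks-list control flow (guarded add helper, fill loop with break, fallback fill loop, final truncation) by a rank-and-sort algorithm: every benefit gets a priority key (its rule's position if a keyword rule matches, otherwise after all matches in BENEFITS order), the five benefits are sorted by that key and the first 3 are returned.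
import Mathlib
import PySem

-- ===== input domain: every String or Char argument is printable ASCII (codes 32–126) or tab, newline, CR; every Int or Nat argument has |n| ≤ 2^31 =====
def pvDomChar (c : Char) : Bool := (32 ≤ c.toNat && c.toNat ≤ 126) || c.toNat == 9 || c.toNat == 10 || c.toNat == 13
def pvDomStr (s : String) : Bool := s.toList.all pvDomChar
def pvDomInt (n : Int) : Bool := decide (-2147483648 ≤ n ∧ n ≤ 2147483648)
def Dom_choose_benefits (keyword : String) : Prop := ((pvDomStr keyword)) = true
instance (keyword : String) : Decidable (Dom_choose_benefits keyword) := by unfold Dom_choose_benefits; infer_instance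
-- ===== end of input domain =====

-- B replaces A's mutate-and-fill control flow by ranking each benefit with a priority key and sorting (objective: alternative).

-- ===== PORT A =====
def pvBENEFITS : List String :=
  ["Upselling & Cross-selling",
   "Product Bundles & Volume Discounts",
   "Progress Bars & Free Gifts",
   "Sticky/Slide Cart Drawer & Cart Popups",
   "In-cart Offers to Boost AOV"]

-- the nested 'add' helper: append item if not already present
def pvAdd (picks : List String) (item : String) : List String :=
  if picks.contains item then picks else picks ++ [item]

-- first fill loop: 'for b in BENEFITS: if len>=3 break; if b not in picks: add(b)'
def pvFill1 (bs : List String) (picks : List String) : List String :=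
  match bs with
  | [] => picks
  | b :: rest =>
      if 3 ≤ picks.length then picks
      else pvFill1 rest (if picks.contains b then picks else pvAdd picks b)

-- second fill loop: 'for b in BENEFITS: if b not in picks: add(b); if len>=3 break'
def pvFill2 (bs : List String) (picks : List String) : List String :=
  match bs with
  | [] => picks
  | b :: rest =>
      let picks' := if picks.contains b then picks else pvAdd picks b
      if 3 ≤ picks'.length then picks' else pvFill2 rest picks'

def choose_benefits (keyword : String) : List String :=
  let text := PySem.Str.lower keyword
  let picks : List String := []
  let picks := if (["bundle", "bundling", "volume"] : List String).any
      (fun w => PySem.Str.isIn w text) then pvAdd picks "Product Bundles & Volume Discounts" else picks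
  let picks := if (["progress", "gift", "free gift", "goal"] : List String).any
      (fun w => PySem.Str.isIn w text) then pvAdd picks "Progress Bars & Free Gifts" else picks
  let picks := if (["drawer", "popup", "popups", "sticky", "slide cart"] : List String).any
      (fun w => PySem.Str.isIn w text) then pvAdd picks "Sticky/Slide Cart Drawer & Cart Popups" else picks
  let picks := if (["upsell", "cross", "cross-sell", "cross sell"] : List String).any
      (fun w => PySem.Str.isIn w text) then pvAdd picks "Upselling & Cross-selling" else picks
  let picks := if (["aov", "average order value", "increase aov", "boost sales"] : List String).any
      (fun w => PySem.Str.isIn w text) then pvAdd picks "In-cart Offers to Boost AOV" else picks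
  let picks := pvFill1 pvBENEFITS picks
  let picks := if picks.length < 3 then pvFill2 pvBENEFITS picks else picks
  if 3 < picks.length then picks.take 3 else picks   -- picks[:3]

-- ===== PORT B =====
def pvKEYWORD_RULES : List (List String × String) :=
  [(["bundle", "bundling", "volume"], "Product Bundles & Volume Discounts"),
   (["progress", "gift", "free gift", "goal"], "Progress Bars & Free Gifts"),
   (["drawer", "popup", "popups", "sticky", "slide cart"], "Sticky/Slide Cart Drawer & Cart Popups"),
   (["upsell", "cross", "cross-sell", "cross sell"], "Upselling & Cross-selling"),
   (["aov", "average order value", "increase aov", "boost sales"], "In-cart Offers to Boost AOV")]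

-- the 'for i, (words, b) in enumerate(KEYWORD_RULES)' loop of rank, with the fallthrough return
def pvRankGo (text benefit : String) (rules : List (List String × String)) (i : Int) : Int :=
  match rules with
  | [] => (pvKEYWORD_RULES.length : Int) + ((PySem.List.index? pvBENEFITS benefit).getD 0)
      -- BENEFITS.index(benefit): rank is only called on members of BENEFITS, so index? is always some
  | (words, b) :: rest =>
      if b == benefit && words.any (fun w => PySem.Str.isIn w text) then i
      else pvRankGo text benefit rest (i + 1)

def choose_benefits_alt (keyword : String) : List String :=
  let text := PySem.Str.lower keyword
  (PySem.List.sorted pvBENEFITS (fun benefit => pvRankGo text benefit pvKEYWORD_RULES 0)).take 3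

-- ===== PRECONDITION & SPEC =====
def Spec_choose_benefits (keyword : String) (out : List String) : Prop := out = choose_benefits_alt keyword
instance (keyword : String) (out : List String) : Decidable (Spec_choose_benefits keyword out) := by unfold Spec_choose_benefits; infer_instance

-- ===== CLAIM (what is proved, stated in full; the proofs are below) =====
def Claim_equal_choose_benefits : Prop := ∀ (keyword : String), Dom_choose_benefits keyword → Spec_choose_benefits keyword (choose_benefits keyword)

-- ===== LEMMAS AND PROOFS =====

-- Both programs are determined by the five keyword tests on the lowered text; case on all 32 outcomes.
theorem choose_benefits_core (text : String) :
    (let picks : List String := []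
     let picks := if (["bundle", "bundling", "volume"] : List String).any
         (fun w => PySem.Str.isIn w text) then pvAdd picks "Product Bundles & Volume Discounts" else picks
     let picks := if (["progress", "gift", "free gift", "goal"] : List String).any
         (fun w => PySem.Str.isIn w text) then pvAdd picks "Progress Bars & Free Gifts" else picks
     let picks := if (["drawer", "popup", "popups", "sticky", "slide cart"] : List String).any
         (fun w => PySem.Str.isIn w text) then pvAdd picks "Sticky/Slide Cart Drawer & Cart Popups" else picks
     let picks := if (["upsell", "cross", "cross-sell", "cross sell"] : List String).any
         (fun w => PySem.Str.isIn w text) then pvAdd picks "Upselling & Cross-selling" else picks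
     let picks := if (["aov", "average order value", "increase aov", "boost sales"] : List String).any
         (fun w => PySem.Str.isIn w text) then pvAdd picks "In-cart Offers to Boost AOV" else picks
     let picks := pvFill1 pvBENEFITS picks
     let picks := if picks.length < 3 then pvFill2 pvBENEFITS picks else picks
     if 3 < picks.length then picks.take 3 else picks) =
    (PySem.List.sorted pvBENEFITS (fun benefit => pvRankGo text benefit pvKEYWORD_RULES 0)).take 3 := by
  cases h1 : (["bundle", "bundling", "volume"] : List String).any (fun w => PySem.Str.isIn w text) <;>
  cases h2 : (["progress", "gift", "free gift", "goal"] : List String).any (fun w => PySem.Str.isIn w text) <;>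
  cases h3 : (["drawer", "popup", "popups", "sticky", "slide cart"] : List String).any (fun w => PySem.Str.isIn w text) <;>
  cases h4 : (["upsell", "cross", "cross-sell", "cross sell"] : List String).any (fun w => PySem.Str.isIn w text) <;>
  cases h5 : (["aov", "average order value", "increase aov", "boost sales"] : List String).any (fun w => PySem.Str.isIn w text) <;>
  simp only [pvKEYWORD_RULES, pvRankGo, h1, h2, h3, h4, h5, Bool.and_true, Bool.and_false,
    Bool.false_eq_true, not_false_eq_true] <;> decide

-- ===== VERDICT (by name: the statement is the Claim_ definition above) =====
theorem choose_benefits_spec : Claim_equal_choose_benefits := by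
  intro keyword _
  unfold Spec_choose_benefits choose_benefits choose_benefits_alt
  exact choose_benefits_core (PySem.Str.lower keyword)
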